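-- pv_equiv track=rewrite | github.com/kcin999/Robinhood-Data-Retrieval | excel.py | findMissingStocks
-- ===== SOURCE A (Python) =====
-- def findMissingStocks(stocksInSheet, stocks):
-- 	stocksAlreadyAdded = []
--
-- 	#Finds duplicates
-- 	for stock in stocks:
-- 		if stock in stocksInSheet:
-- 			stocksAlreadyAdded.append(stock)
--
-- 	newStocks = stocks.copy()
--
-- 	for stock in stocksAlreadyAdded:
-- 		del newStocks[stock]
--
-- 	return newStocks
-- ===== SOURCE B (Python) =====
-- def findMissingStocks(stocksInSheet, stocks):
-- 	return {stock: value for stock, value in stocks.items() if stock not in stocksInSheet}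
-- ===== Notes on version B (the rewrite author's own statement) =====
-- stated objective: simpler
-- what changed: Replaces A's two-phase collect-matched-keys-then-delete-from-a-copy with a single constructive pass: a dict comprehension keeping entries whose key is not in the sheet.
import Mathlib
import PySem

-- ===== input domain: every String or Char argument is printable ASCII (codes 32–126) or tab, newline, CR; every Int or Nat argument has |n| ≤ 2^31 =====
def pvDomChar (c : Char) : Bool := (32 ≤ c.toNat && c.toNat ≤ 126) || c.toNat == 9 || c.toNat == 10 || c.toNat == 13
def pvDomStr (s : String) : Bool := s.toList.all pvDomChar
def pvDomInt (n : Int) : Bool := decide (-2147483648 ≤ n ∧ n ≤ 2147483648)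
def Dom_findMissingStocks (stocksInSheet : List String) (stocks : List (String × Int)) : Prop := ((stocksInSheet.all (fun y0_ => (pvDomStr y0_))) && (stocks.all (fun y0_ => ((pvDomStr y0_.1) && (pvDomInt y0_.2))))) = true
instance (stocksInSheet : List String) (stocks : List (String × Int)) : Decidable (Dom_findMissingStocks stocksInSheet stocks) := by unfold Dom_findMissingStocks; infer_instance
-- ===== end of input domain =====

-- B replaces A's collect-matched-keys-then-delete-from-a-copy with one constructive filtering pass (simpler).


-- ===== PORT A =====
-- del newStocks[stock]: removes the entry with that key (present by construction; first match on dup keys)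
def pvEraseKey : List (String × Int) → String → List (String × Int)
  | [], _ => []
  | kv :: rest, k => if kv.1 = k then rest else kv :: pvEraseKey rest k

def findMissingStocks (stocksInSheet : List String) (stocks : List (String × Int)) : List (String × Int) :=
  let stocksAlreadyAdded : List String :=
    stocks.foldl (fun acc kv => if stocksInSheet.contains kv.1 then acc ++ [kv.1] else acc) []
  stocksAlreadyAdded.foldl pvEraseKey stocks

-- ===== PORT B =====
def findMissingStocks_alt (stocksInSheet : List String) (stocks : List (String × Int)) : List (String × Int) :=
  stocks.filter (fun kv => !stocksInSheet.contains kv.1)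

-- ===== PRECONDITION & SPEC =====
def Spec_findMissingStocks (stocksInSheet : List String) (stocks : List (String × Int)) (out : List (String × Int)) : Prop := out = findMissingStocks_alt stocksInSheet stocks
instance (stocksInSheet : List String) (stocks : List (String × Int)) (out : List (String × Int)) : Decidable (Spec_findMissingStocks stocksInSheet stocks out) := by unfold Spec_findMissingStocks; infer_instance

-- ===== CLAIM (what is proved, stated in full; the proofs are below) =====
def Claim_equal_findMissingStocks : Prop := ∀ (stocksInSheet : List String) (stocks : List (String × Int)), Dom_findMissingStocks stocksInSheet stocks → Spec_findMissingStocks stocksInSheet stocks (findMissingStocks stocksInSheet stocks)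

-- ===== LEMMAS AND PROOFS =====
-- Phase 1 of A accumulates exactly the keys of stocks that are in the sheet, in order.
theorem pvAdded_eq (sheet : List String) (stocks : List (String × Int)) (acc : List String) :
    stocks.foldl (fun acc kv => if sheet.contains kv.1 then acc ++ [kv.1] else acc) acc
      = acc ++ (stocks.map Prod.fst).filter sheet.contains := by
  induction stocks generalizing acc with
  | nil => simp
  | cons kv rest ih =>
    rw [List.foldl_cons, List.map_cons, List.filter_cons]
    by_cases h : sheet.contains kv.1
    · rw [if_pos h, if_pos h, ih]; simp
    · rw [if_neg h, if_neg h, ih]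

-- Erasing keys all different from the head key leaves the head in place.
theorem pvFoldlErase_cons_of_ne (k : String) (v : Int) (d : List (String × Int))
    (ms : List String) (h : ∀ m ∈ ms, m ≠ k) :
    ms.foldl pvEraseKey ((k, v) :: d) = (k, v) :: ms.foldl pvEraseKey d := by
  induction ms generalizing d with
  | nil => rfl
  | cons m ms ih =>
    have hm : m ≠ k := h m (List.mem_cons_self ..)
    have e : pvEraseKey ((k, v) :: d) m = (k, v) :: pvEraseKey d m := by
      simp only [pvEraseKey]
      rw [if_neg (fun he => hm he.symm)]
    rw [List.foldl_cons, e, List.foldl_cons,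
        ih (pvEraseKey d m) (fun x hx => h x (List.mem_cons_of_mem _ hx))]

-- Phase 2 of A, applied to phase 1's key list, is exactly B's filter.
theorem pvErase_matched (sheet : List String) (stocks : List (String × Int)) :
    ((stocks.map Prod.fst).filter sheet.contains).foldl pvEraseKey stocks
      = stocks.filter (fun kv => !sheet.contains kv.1) := by
  induction stocks with
  | nil => simp
  | cons kv rest ih =>
    obtain ⟨k, v⟩ := kv
    rw [List.map_cons, List.filter_cons]
    by_cases h : sheet.contains k
    · rw [if_pos h, List.foldl_cons]
      have e : pvEraseKey ((k, v) :: rest) k = rest := by simp [pvEraseKey]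
      rw [e, ih]
      simp only [List.filter_cons]
      rw [if_neg (by simpa using h)]
    · rw [if_neg h]
      have hms : ∀ m ∈ (rest.map Prod.fst).filter sheet.contains, m ≠ k := by
        intro m hm hmk
        exact h (by simpa [hmk] using (List.of_mem_filter hm))
      rw [pvFoldlErase_cons_of_ne k v rest _ hms, ih]
      simp only [List.filter_cons]
      rw [if_pos (by simpa using h)]

-- ===== VERDICT (by name: the statement is the Claim_ definition above) =====
theorem findMissingStocks_spec : Claim_equal_findMissingStocks := by
  intro sheet stocks _
  unfold Spec_findMissingStocks findMissingStocks findMissingStocks_alt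
  rw [pvAdded_eq, List.nil_append, pvErase_matched]
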